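-- pv_equiv track=rewrite | github.com/eugenioLR/Picross_AI | bitmap_image.py | common_from_perms
-- ===== SOURCE A (Python) =====
-- def common_from_perms(permutations):
--     aux = permutations[0]
--     l = len(aux)
--     finish = False
--     i = 0
--     while i < len(permutations) and not finish:
--         j = 0
--         while j < l:
--             if not aux[j] is None and permutations[i][j] != aux[j]:
--                 aux[j] = None
--             j += 1
--         finish = list(aux).count(None) == len(aux)
--         i += 1
--     return aux
-- ===== SOURCE B (Python) =====
-- def common_from_perms(permutations):
--     first = permutations[0]
--     for j in range(len(first)):
--         if first[j] is not None and any(perm[j] != first[j] for perm in permutations):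
--             first[j] = None
--     return first
-- ===== Notes on version B (the rewrite author's own statement) =====
-- stated objective: simpler
-- what changed: A's row-major while-loops with an early-exit all-None flag are replaced by a single column-major pass: for each position j, null it when any permutation disagrees with first[j] (any() short-circuits), mutating permutations[0] in place just like A.
import Mathlib
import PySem

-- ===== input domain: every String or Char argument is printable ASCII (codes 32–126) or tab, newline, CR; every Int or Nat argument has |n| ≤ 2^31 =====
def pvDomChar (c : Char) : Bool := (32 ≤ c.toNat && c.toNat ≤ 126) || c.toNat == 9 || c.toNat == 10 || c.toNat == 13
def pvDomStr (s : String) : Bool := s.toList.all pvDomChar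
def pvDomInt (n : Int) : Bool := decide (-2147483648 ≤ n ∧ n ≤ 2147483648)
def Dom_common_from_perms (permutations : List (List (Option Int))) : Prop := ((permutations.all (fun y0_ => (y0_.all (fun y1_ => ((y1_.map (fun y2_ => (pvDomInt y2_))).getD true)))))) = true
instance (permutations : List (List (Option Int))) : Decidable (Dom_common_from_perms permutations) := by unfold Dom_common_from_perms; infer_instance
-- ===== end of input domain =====

-- B replaces A's row-major while-loops (with early-exit flag) by one column-major pass; objective: simpler.
-- Both A and B mutate permutations[0] in place (the returned list IS permutations[0]); the equivalence proved is about the return value.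

-- ===== PORT A =====
-- one step of A's inner 'while j < l' loop body at index j
def pvUpdA (row : List (Option Int)) (a : List (Option Int)) (j : Nat) : List (Option Int) :=
  match a[j]? with
  | some (some v) => if row[j]? ≠ some (some v) then a.set j none else a
  | _ => a

-- A's inner 'while j < l' loop over one row (l = aux.length is invariant: set preserves length)
def pvStepRowA (aux row : List (Option Int)) : List (Option Int) :=
  (List.range aux.length).foldl (pvUpdA row) aux

-- A's outer 'while i < len(permutations) and not finish' loop
def pvLoopA (rows : List (List (Option Int))) (aux : List (Option Int)) : List (Option Int) :=
  match rows with
  | [] => aux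
  | row :: rest =>
      let a' := pvStepRowA aux row
      if a'.count none = a'.length then a' else pvLoopA rest a'

def common_from_perms (permutations : List (List (Option Int))) : List (Option Int) :=
  match permutations with
  | [] => []  -- Python raises IndexError on permutations[0]; excluded by Pre_
  | first :: _ => pvLoopA permutations first

-- ===== PORT B =====
-- B's loop body at position j: null first[j] if any permutation disagrees there
def pvUpdB (perms : List (List (Option Int))) (f : List (Option Int)) (j : Nat) : List (Option Int) :=
  match f[j]? with
  | some (some v) => if perms.any (fun p => p[j]? ≠ some (some v)) then f.set j none else f
  | _ => f

def common_from_perms_alt (permutations : List (List (Option Int))) : List (Option Int) :=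
  match permutations with
  | [] => []  -- Python raises IndexError on permutations[0]; excluded by Pre_
  | first :: _ => (List.range first.length).foldl (pvUpdB permutations) first

-- ===== PRECONDITION & SPEC =====
-- Pre_ holds exactly where Python A returns normally: the input
-- is nonempty, and for every row k and position j of the first row, either row k covers j or that
-- position is already dead before row k is scanned (first[j] is None, or some earlier long-enough row differs there);
-- otherwise A raises IndexError (and B raises on the same inputs).
def Pre_common_from_perms (permutations : List (List (Option Int))) : Prop :=
  permutations ≠ [] ∧
  ∀ k < permutations.length, ∀ j < (permutations.headD []).length,
    (j < (permutations.getD k []).length ∨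
     (permutations.headD []).getD j none = none ∨
     ∃ i < k, j < (permutations.getD i []).length ∧
       (permutations.getD i []).getD j none ≠ (permutations.headD []).getD j none)
instance (permutations : List (List (Option Int))) : Decidable (Pre_common_from_perms permutations) := by unfold Pre_common_from_perms; infer_instance

def pvWitness_common_from_perms : List (List (Option Int)) :=
  [[some 1, none, some 3], [some 1, some 2, some 4]]

def Spec_common_from_perms (permutations : List (List (Option Int))) (out : List (Option Int)) : Prop := out = common_from_perms_alt permutations
instance (permutations : List (List (Option Int))) (out : List (Option Int)) : Decidable (Spec_common_from_perms permutations out) := by unfold Spec_common_from_perms; infer_instance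

-- ===== CLAIM (what is proved, stated in full; the proofs are below) =====
def Claim_equal_common_from_perms : Prop := ∀ (permutations : List (List (Option Int))), Dom_common_from_perms permutations → Pre_common_from_perms permutations → Spec_common_from_perms permutations (common_from_perms permutations)

-- ===== LEMMAS AND PROOFS =====

-- the per-column effect of one row of A's update
def colStep (j : Nat) (row : List (Option Int)) (o : Option Int) : Option Int :=
  match o with
  | none => none
  | some v => if row[j]? = some (some v) then some v else none

-- the per-column effect of B's update
def colB (perms : List (List (Option Int))) (j : Nat) (o : Option Int) : Option Int :=
  match o with
  | none => none
  | some v => if perms.any (fun p => p[j]? ≠ some (some v)) then none else some v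

-- generic: folding an index-local update over range n, characterised by getElem?
theorem foldl_range_upd (u : List (Option Int) → Nat → List (Option Int))
    (g : Nat → Option Int → Option Int)
    (hself : ∀ a j, (u a j)[j]? = (a[j]?).map (g j))
    (hother : ∀ a j k, k ≠ j → (u a j)[k]? = a[k]?) :
    ∀ (n : Nat) (a : List (Option Int)) (j : Nat),
      ((List.range n).foldl u a)[j]? = if j < n then (a[j]?).map (g j) else a[j]? := by
  intro n
  induction n with
  | zero => intro a j; simp
  | succ n ih =>
    intro a j
    rw [List.range_succ, List.foldl_append, List.foldl_cons, List.foldl_nil]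
    by_cases hj : j = n
    · subst hj
      rw [hself, ih]
      simp
    · rw [hother _ _ _ hj, ih]
      by_cases h2 : j < n
      · simp [h2, Nat.lt_succ_of_lt h2]
      · have h3 : ¬ j < n + 1 := by omega
        simp [h2, h3]

theorem updA_self (row a : List (Option Int)) (j : Nat) :
    (pvUpdA row a j)[j]? = (a[j]?).map (colStep j row) := by
  unfold pvUpdA
  cases h : a[j]? with
  | none => simp [h]
  | some o =>
    cases o with
    | none => simp [h, colStep]
    | some v =>
      have hlt : j < a.length := (List.getElem?_eq_some_iff.mp h).1
      by_cases hc : row[j]? = some (some v)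
      · simp [h, hc, colStep]
      · simp [hc, colStep, List.getElem?_set_self hlt]

theorem updA_other (row a : List (Option Int)) (j k : Nat) (h : k ≠ j) :
    (pvUpdA row a j)[k]? = a[k]? := by
  unfold pvUpdA
  cases h2 : a[j]? with
  | none => rfl
  | some o =>
    cases o with
    | none => rfl
    | some v =>
      by_cases hc : row[j]? = some (some v)
      · simp [hc]
      · simp only [if_pos hc]
        exact List.getElem?_set_ne (Ne.symm h)

theorem updB_self (perms : List (List (Option Int))) (a : List (Option Int)) (j : Nat) :
    (pvUpdB perms a j)[j]? = (a[j]?).map (colB perms j) := by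
  unfold pvUpdB
  cases h : a[j]? with
  | none => simp [h]
  | some o =>
    cases o with
    | none => simp [h, colB]
    | some v =>
      have hlt : j < a.length := (List.getElem?_eq_some_iff.mp h).1
      simp only [Option.map_some, colB]
      by_cases hc : (perms.any fun p => p[j]? ≠ some (some v)) = true
      · rw [if_pos hc, if_pos hc, List.getElem?_set_self hlt]
      · rw [if_neg hc, if_neg hc, h]


theorem updB_other (perms : List (List (Option Int))) (a : List (Option Int)) (j k : Nat) (h : k ≠ j) :
    (pvUpdB perms a j)[k]? = a[k]? := by
  unfold pvUpdB
  cases h2 : a[j]? with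
  | none => rfl
  | some o =>
    cases o with
    | none => rfl
    | some v =>
      show (if (perms.any fun p => p[j]? ≠ some (some v)) = true then a.set j none else a)[k]? = a[k]?
      by_cases hc : (perms.any fun p => p[j]? ≠ some (some v)) = true
      · rw [if_pos hc]
        exact List.getElem?_set_ne (Ne.symm h)
      · rw [if_neg hc]

theorem stepRowA_get (aux row : List (Option Int)) (j : Nat) :
    (pvStepRowA aux row)[j]? = (aux[j]?).map (colStep j row) := by
  unfold pvStepRowA
  rw [foldl_range_upd (pvUpdA row) (fun j => colStep j row) (updA_self row) (updA_other row)]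
  by_cases hj : j < aux.length
  · simp [hj]
  · simp [hj]

-- all-None states are fixed points of one row step
theorem stepRowA_allNone (a row : List (Option Int)) (h : ∀ x ∈ a, x = none) :
    pvStepRowA a row = a := by
  apply List.ext_getElem?
  intro j
  rw [stepRowA_get]
  cases h2 : a[j]? with
  | none => rfl
  | some x =>
    have := h x (List.mem_of_getElem? h2)
    subst this
    simp [colStep]

-- the early exit does not change the result: pvLoopA = plain foldl
theorem loopA_eq_foldl (rows : List (List (Option Int))) (a : List (Option Int)) :
    pvLoopA rows a = rows.foldl pvStepRowA a := by induction rows generalizing a with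
  | nil => rfl
  | cons row rest ih =>
    show pvLoopA (row :: rest) a = _
    unfold pvLoopA
    simp only [List.foldl_cons]
    split
    · next hfin =>
      have hall : ∀ x ∈ pvStepRowA a row, x = none := by
        intro x hx
        exact ((List.count_eq_length).mp hfin x hx).symm
      have hfix : ∀ rs : List (List (Option Int)), rs.foldl pvStepRowA (pvStepRowA a row) = pvStepRowA a row := by
        intro rs
        induction rs with
        | nil => rfl
        | cons r rs ih2 =>
          simp only [List.foldl_cons, stepRowA_allNone _ r hall, ih2]
      exact (hfix rest).symm
    · exact ih _

theorem foldl_stepRowA_get (rows : List (List (Option Int))) (a : List (Option Int)) (j : Nat) :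
    (rows.foldl pvStepRowA a)[j]? = (a[j]?).map (fun x => rows.foldl (fun o row => colStep j row o) x) := by
  induction rows generalizing a with
  | nil => cases h : a[j]? <;> simp [h]
  | cons row rest ih =>
    simp only [List.foldl_cons]
    rw [ih, stepRowA_get]
    cases h : a[j]?
    · simp
    · simp

theorem colfold (j : Nat) (rows : List (List (Option Int))) (o : Option Int) :
    rows.foldl (fun o row => colStep j row o) o = colB rows j o := by
  induction rows generalizing o with
  | nil => cases o <;> rfl
  | cons row rest ih =>
    simp only [List.foldl_cons]
    rw [ih]
    cases o with
    | none => rfl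
    | some v =>
      show colB rest j (colStep j row (some v)) = _
      by_cases hc : row[j]? = some (some v)
      · simp [colStep, colB, hc]
      · simp [colStep, colB, hc]

-- ===== VERDICT (by name: the statement is the Claim_ definition above) =====
theorem common_from_perms_spec : Claim_equal_common_from_perms := by
  unfold Claim_equal_common_from_perms
  intro perms _ hpre
  unfold Spec_common_from_perms
  cases perms with
  | nil => exact absurd rfl hpre.1
  | cons first rest =>
    show pvLoopA (first :: rest) first = List.foldl (pvUpdB (first :: rest)) first (List.range first.length)
    rw [loopA_eq_foldl]
    apply List.ext_getElem?
    intro j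
    rw [foldl_stepRowA_get,
        foldl_range_upd (pvUpdB (first :: rest)) (colB (first :: rest)) (updB_self _) (updB_other _)]
    by_cases hj : j < first.length
    · simp only [hj, if_pos]
      congr 1
      funext x
      exact colfold j (first :: rest) x
    · simp [hj]
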